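-- pv_equiv track=rewrite | github.com/alex-golts/advent_of_code_2019 | day17.py | draw_map
-- ===== SOURCE A (Python) =====
-- def draw_map(prog):
--     out_map = []
--     cur_line = ''
--     for item in prog:
--
--         if item == 35:
--             cur_line += '#'
--         elif item == 46:
--             cur_line += '.'
--         elif item == 60:
--             cur_line += '<'
--         elif item == 62:
--             cur_line += '>'
--         elif item == 94:
--             cur_line += '^'
--         elif item == 118:
--             cur_line += 'v'
--         elif item == 10:
--             out_map.append(cur_line)
--             cur_line = ''
--         else:
--             pass
--     return out_map[:-1]
-- ===== SOURCE B (Python) =====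
-- _CHARS = {35: '#', 46: '.', 60: '<', 62: '>', 94: '^', 118: 'v', 10: '\n'}
--
-- def draw_map(prog):
--     s = ''.join(_CHARS[item] for item in prog if item in _CHARS)
--     return s.split('\n')[:-2]
-- ===== Notes on version B (the rewrite author's own statement) =====
-- stated objective: idiomatic
-- what changed: Replaces the 8-branch accumulator loop that builds lines character by character with a dict-driven filter/translate into one string followed by a single split('\n')[:-2]; the line-building state machine disappears.
import Mathlib
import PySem

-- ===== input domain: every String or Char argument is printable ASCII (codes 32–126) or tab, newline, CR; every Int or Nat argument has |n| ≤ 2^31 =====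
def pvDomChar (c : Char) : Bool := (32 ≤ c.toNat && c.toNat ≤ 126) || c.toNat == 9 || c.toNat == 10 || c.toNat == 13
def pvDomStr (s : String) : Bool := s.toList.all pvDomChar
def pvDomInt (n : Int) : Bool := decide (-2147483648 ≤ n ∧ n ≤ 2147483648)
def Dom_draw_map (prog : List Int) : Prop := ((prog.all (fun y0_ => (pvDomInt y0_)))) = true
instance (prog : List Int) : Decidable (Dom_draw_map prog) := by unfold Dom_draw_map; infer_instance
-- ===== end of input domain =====

-- B replaces A's per-character line-accumulator state machine by a dict-based
-- translate/filter into one string and a single split('\n')[:-2] (idiomatic; same cost).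

-- ===== PORT A =====
-- one loop iteration of A: state = (out_map, cur_line), both over List Char
def pvDrawStep (st : List (List Char) × List Char) (item : Int) : List (List Char) × List Char :=
  if item = 35 then (st.1, st.2 ++ ['#'])
  else if item = 46 then (st.1, st.2 ++ ['.'])
  else if item = 60 then (st.1, st.2 ++ ['<'])
  else if item = 62 then (st.1, st.2 ++ ['>'])
  else if item = 94 then (st.1, st.2 ++ ['^'])
  else if item = 118 then (st.1, st.2 ++ ['v'])
  else if item = 10 then (st.1 ++ [st.2], [])
  else st

def draw_map (prog : List Int) : List String :=
  (PySem.List.slice (prog.foldl pvDrawStep ([], [])).1 none (some (-1))).map String.ofList   -- out_map[:-1]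

-- ===== PORT B =====
def pvTable : PySem.Dict Int Char :=
  PySem.Dict.ofList [(35, '#'), (46, '.'), (60, '<'), (62, '>'), (94, '^'), (118, 'v'), (10, '\n')]

def draw_map_alt (prog : List Int) : List String :=
  -- s = ''.join(_CHARS[item] for item in prog if item in _CHARS); return s.split('\n')[:-2]
  (PySem.List.slice
    (PySem.Chars.splitOn (prog.filterMap (fun item => pvTable.get? item)) ['\n'])
    none (some (-2))).map String.ofList

-- ===== PRECONDITION & SPEC =====
def Spec_draw_map (prog : List Int) (out : List String) : Prop := out = draw_map_alt prog
instance (prog : List Int) (out : List String) : Decidable (Spec_draw_map prog out) := by unfold Spec_draw_map; infer_instance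

-- ===== CLAIM (what is proved, stated in full; the proofs are below) =====
def Claim_equal_draw_map : Prop := ∀ (prog : List Int), Dom_draw_map prog → Spec_draw_map prog (draw_map prog)

-- ===== LEMMAS AND PROOFS =====

-- structural split on '\n'
def pvSplitNl : List Char → List (List Char)
  | [] => [[]]
  | c :: r => if c = '\n' then [] :: pvSplitNl r else (pvSplitNl r).modifyHead (c :: ·)

theorem pvSplitNl_ne_nil (cs : List Char) : pvSplitNl cs ≠ [] := by
  cases cs with
  | nil => simp [pvSplitNl]
  | cons c r =>
    simp only [pvSplitNl]
    split_ifs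
    · simp
    · intro h
      have := congrArg List.length h
      simp at this
      exact pvSplitNl_ne_nil r this

theorem pvGo (fuel : Nat) (l cur : List Char) (acc : List (List Char)) (h : l.length < fuel) :
    PySem.Chars.splitOn.go ['\n'] fuel l cur acc
      = acc.reverse ++ (pvSplitNl l).modifyHead (cur.reverse ++ ·) := by
  induction fuel generalizing l cur acc with
  | zero => omega
  | succ f ih =>
    cases l with
    | nil =>
      simp [PySem.Chars.splitOn.go, pvSplitNl]
    | cons c rest =>
      obtain ⟨s0, sr, hS⟩ : ∃ s0 sr, pvSplitNl rest = s0 :: sr := by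
        cases hh : pvSplitNl rest with
        | nil => exact absurd hh (pvSplitNl_ne_nil rest)
        | cons a b => exact ⟨a, b, rfl⟩
      by_cases hc : c = '\n'
      · subst hc
        rw [show PySem.Chars.splitOn.go ['\n'] (f+1) ('\n' :: rest) cur acc
              = PySem.Chars.splitOn.go ['\n'] f rest [] (cur.reverse :: acc) by
            simp [PySem.Chars.splitOn.go, List.isPrefixOf]]
        rw [ih rest [] (cur.reverse :: acc) (by simpa using Nat.lt_of_succ_lt_succ h)]
        simp [pvSplitNl, hS]
      · rw [show PySem.Chars.splitOn.go ['\n'] (f+1) (c :: rest) cur acc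
              = PySem.Chars.splitOn.go ['\n'] f rest (c :: cur) acc by
            have hne : ¬ ('\n' = c) := fun hh => hc hh.symm
            simp [PySem.Chars.splitOn.go, List.isPrefixOf, hne]]
        rw [ih rest (c :: cur) acc (by simpa using Nat.lt_of_succ_lt_succ h)]
        simp [pvSplitNl, hc, hS]

theorem pvSplitOn_eq (s : List Char) : PySem.Chars.splitOn s ['\n'] = pvSplitNl s := by
  rw [PySem.Chars.splitOn, pvGo (s.length + 1) s [] [] (by omega)]
  obtain ⟨s0, sr, hS⟩ : ∃ s0 sr, pvSplitNl s = s0 :: sr := by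
    cases hh : pvSplitNl s with
    | nil => exact absurd hh (pvSplitNl_ne_nil s)
    | cons a b => exact ⟨a, b, rfl⟩
  simp [hS]

theorem pvTable_get (i : Int) :
    pvTable.get? i =
      if i = 35 then some '#' else if i = 46 then some '.' else if i = 60 then some '<'
      else if i = 62 then some '>' else if i = 94 then some '^' else if i = 118 then some 'v'
      else if i = 10 then some '\n' else none := by
  have h : pvTable = PySem.Dict.mk [(35, '#'), (46, '.'), (60, '<'), (62, '>'), (94, '^'), (118, 'v'), (10, '\n')] := rfl
  rw [h]
  simp only [PySem.Dict.get?, List.find?, @eq_comm Int i]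
  split_ifs <;> simp_all [show ∀ a b : Int, (a == b) = decide (a = b) from fun _ _ => rfl]

theorem pvFold (l : List Int) (out : List (List Char)) (cur : List Char) :
    l.foldl pvDrawStep (out, cur)
      = (out ++ ((pvSplitNl (l.filterMap (fun i => pvTable.get? i))).modifyHead (cur ++ ·)).dropLast,
         ((pvSplitNl (l.filterMap (fun i => pvTable.get? i))).modifyHead (cur ++ ·)).getLastD []) := by
  induction l generalizing out cur with
  | nil => simp [pvSplitNl]
  | cons i rest ih =>
    obtain ⟨s0, sr, hS⟩ : ∃ s0 sr, pvSplitNl (rest.filterMap (fun i => pvTable.get? i)) = s0 :: sr := by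
      cases hh : pvSplitNl (rest.filterMap (fun i => pvTable.get? i)) with
      | nil => exact absurd hh (pvSplitNl_ne_nil _)
      | cons a b => exact ⟨a, b, rfl⟩
    have hg := pvTable_get i
    simp only [List.foldl_cons, List.filterMap_cons]
    by_cases h1 : i = 35
    · subst h1; rw [show pvDrawStep (out, cur) 35 = (out, cur ++ ['#']) by simp [pvDrawStep], ih]
      simp at hg; rw [hg]; simp [pvSplitNl, hS]
    · by_cases h2 : i = 46
      · subst h2; rw [show pvDrawStep (out, cur) 46 = (out, cur ++ ['.']) by simp [pvDrawStep], ih]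
        simp at hg; rw [hg]; simp [pvSplitNl, hS]
      · by_cases h3 : i = 60
        · subst h3; rw [show pvDrawStep (out, cur) 60 = (out, cur ++ ['<']) by simp [pvDrawStep], ih]
          simp at hg; rw [hg]; simp [pvSplitNl, hS]
        · by_cases h4 : i = 62
          · subst h4; rw [show pvDrawStep (out, cur) 62 = (out, cur ++ ['>']) by simp [pvDrawStep], ih]
            simp at hg; rw [hg]; simp [pvSplitNl, hS]
          · by_cases h5 : i = 94
            · subst h5; rw [show pvDrawStep (out, cur) 94 = (out, cur ++ ['^']) by simp [pvDrawStep], ih]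
              simp at hg; rw [hg]; simp [pvSplitNl, hS]
            · by_cases h6 : i = 118
              · subst h6; rw [show pvDrawStep (out, cur) 118 = (out, cur ++ ['v']) by simp [pvDrawStep], ih]
                simp at hg; rw [hg]; simp [pvSplitNl, hS]
              · by_cases h7 : i = 10
                · subst h7; rw [show pvDrawStep (out, cur) 10 = (out ++ [cur], []) by simp [pvDrawStep], ih]
                  simp at hg; rw [hg]; simp [pvSplitNl, hS]
                · rw [show pvDrawStep (out, cur) i = (out, cur) by simp [pvDrawStep, h1, h2, h3, h4, h5, h6, h7], ih]
                  rw [hg]; simp [h1, h2, h3, h4, h5, h6, h7]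

theorem pvMain (prog : List Int) : draw_map prog = draw_map_alt prog := by
  unfold draw_map draw_map_alt
  rw [pvFold, pvSplitOn_eq]
  obtain ⟨s0, sr, hS⟩ : ∃ s0 sr, pvSplitNl (prog.filterMap (fun i => pvTable.get? i)) = s0 :: sr := by
    cases hh : pvSplitNl (prog.filterMap (fun i => pvTable.get? i)) with
    | nil => exact absurd hh (pvSplitNl_ne_nil _)
    | cons a b => exact ⟨a, b, rfl⟩
  rw [hS]
  rw [PySem.List.slice_to_neg_one, PySem.List.slice_to_neg_ofNat _ 2 (by omega)]
  simp only [List.modifyHead_cons, List.nil_append, List.dropLast_eq_take]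
  rw [List.take_take]
  congr 2
  simp

-- ===== VERDICT (by name: the statement is the Claim_ definition above) =====
theorem draw_map_spec : Claim_equal_draw_map := by
  intro prog _
  unfold Spec_draw_map
  exact pvMain prog
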